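-- pv_equiv track=rewrite | github.com/yongunt/problems | first_letter_shift/main.py | shift_sentence
-- ===== SOURCE A (Python) =====
-- def shift_sentence(sentence:str) -> str:
--     sentence:list = [list(i) for i in sentence.split(' ')]
--     first_letters:list = [i[0] for i in sentence]
--
--     first_letters.insert(0, first_letters[-1])
--     first_letters.pop(-1)
--
--     for i in range(len(sentence)): sentence[i][0] = first_letters[i]
--
--     sentence:list = [''.join(i) for i in sentence]
--
--     return ' '.join(sentence)
-- ===== SOURCE B (Python) =====
-- def shift_sentence(sentence:str) -> str:
--     words = sentence.split(' ')
--     out = []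
--     carry = words[-1][0]
--     for w in words:
--         out.append(carry + w[1:])
--         carry = w[0]
--     return ' '.join(out)
-- ===== Notes on version B (the rewrite author's own statement) =====
-- stated objective: alternative
-- what changed: B makes a single pass over the words with a carried letter (seeded with the last word's first letter), appending carry + w[1:] and updating the carry to w[0], instead of A's staged passes that explode words into char lists, build a list of first letters, rotate it with insert/pop and mutate each char list in an index loop.
-- outside the precondition, e.g. on shift_sentence(' '): A raises IndexError, B raises IndexError
import Mathlib
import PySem

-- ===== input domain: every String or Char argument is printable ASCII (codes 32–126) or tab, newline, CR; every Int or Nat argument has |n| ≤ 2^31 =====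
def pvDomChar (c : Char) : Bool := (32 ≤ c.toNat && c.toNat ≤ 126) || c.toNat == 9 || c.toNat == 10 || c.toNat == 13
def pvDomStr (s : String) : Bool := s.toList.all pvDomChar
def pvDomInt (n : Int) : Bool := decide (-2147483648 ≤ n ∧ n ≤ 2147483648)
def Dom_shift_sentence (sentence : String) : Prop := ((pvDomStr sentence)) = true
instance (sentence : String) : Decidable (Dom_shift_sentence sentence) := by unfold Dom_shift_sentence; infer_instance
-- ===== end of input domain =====

-- B replaces A's staged passes (explode words to char lists, build the firsts list, rotate it
-- with insert/pop, mutate each list in an index loop) by ONE pass over the words with a carried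
-- letter seeded from the last word (alternative decomposition; same cost).

-- ===== PORT A =====
def shift_sentence (sentence : String) : String :=
  -- sentence = [list(i) for i in sentence.split(' ')]
  let words : List (List Char) := PySem.Chars.splitOn sentence.toList [' ']
  -- first_letters = [i[0] for i in sentence]   (i[0] raises on an empty word: excluded by Pre_)
  let firsts : List Char := words.map (fun w => PySem.List.pyGetD w 0 ' ')
  -- first_letters.insert(0, first_letters[-1])
  let fl1 : List Char := PySem.List.insert firsts 0 (PySem.List.pyGetD firsts (-1) ' ')
  -- first_letters.pop(-1)
  let fl2 : List Char := ((PySem.List.pop? fl1 (-1)).map (·.2)).getD fl1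
  -- for i in range(len(sentence)): sentence[i][0] = first_letters[i]
  let words2 : List (List Char) :=
    (PySem.List.pyRange 0 words.length 1).foldl
      (fun acc i => acc.set i.toNat ((acc.getD i.toNat []).set 0 (PySem.List.pyGetD fl2 i ' '))) words
  -- ' '.join([''.join(i) for i in sentence])
  String.ofList (PySem.Chars.join [' '] words2)

-- ===== PORT B =====
def shift_sentence_alt (sentence : String) : String :=
  -- words = sentence.split(' ')
  let words : List (List Char) := PySem.Chars.splitOn sentence.toList [' ']
  -- carry = words[-1][0]   (raises on empty last word: excluded by Pre_)
  let init : Char := PySem.List.pyGetD (PySem.List.pyGetD words (-1) []) 0 ' '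
  -- for w in words: out.append(carry + w[1:]); carry = w[0]
  let res : List (List Char) × Char :=
    words.foldl
      (fun p w => (p.1 ++ [p.2 :: PySem.List.slice w (some 1) none], PySem.List.pyGetD w 0 ' '))
      ([], init)
  -- ' '.join(out)
  String.ofList (PySem.Chars.join [' '] res.1)

-- ===== PRECONDITION & SPEC =====
-- Pre_ excludes exactly the inputs with an empty word in sentence.split(' ') (empty string,
-- leading/trailing or doubled spaces): there w[0] raises IndexError in A (and in B alike).
def Pre_shift_sentence (sentence : String) : Prop :=
  ∀ w ∈ PySem.Chars.splitOn sentence.toList [' '], w ≠ []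
instance (sentence : String) : Decidable (Pre_shift_sentence sentence) := by
  unfold Pre_shift_sentence; infer_instance
def pvWitness_shift_sentence : String := "hello world"
def Spec_shift_sentence (sentence : String) (out : String) : Prop := out = shift_sentence_alt sentence
instance (sentence : String) (out : String) : Decidable (Spec_shift_sentence sentence out) := by unfold Spec_shift_sentence; infer_instance

-- ===== CLAIM (what is proved, stated in full; the proofs are below) =====
def Claim_equal_shift_sentence : Prop := ∀ (sentence : String), Dom_shift_sentence sentence → Pre_shift_sentence sentence → Spec_shift_sentence sentence (shift_sentence sentence)

-- ===== LEMMAS AND PROOFS =====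

-- split(' ') always yields at least one piece
lemma splitOn_go_ne_nil (sep : List Char) : ∀ (fuel : Nat) (s cur : List Char)
    (accs : List (List Char)), PySem.Chars.splitOn.go sep fuel s cur accs ≠ [] := by
  intro fuel
  induction fuel with
  | zero => intro s cur accs; rw [PySem.Chars.splitOn.go.eq_def]; simp
  | succ n ih =>
    intro s cur accs; rw [PySem.Chars.splitOn.go.eq_def]
    split
    · simp
    · simp
    · next fuel c rest heq =>
      obtain rfl : fuel = n := by omega
      split
      · exact ih _ _ _
      · exact ih _ _ _

lemma splitOn_ne_nil (s sep : List Char) : PySem.Chars.splitOn s sep ≠ [] :=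
  splitOn_go_ne_nil sep _ s [] []

-- A's index loop 'for i in range(len(xs)): xs[i] = f(i, xs[i])' is mapIdx
lemma setLoop_aux {α : Type} (f : Int → α → α) (d : α) :
    ∀ (post pre : List α),
      (PySem.List.pyRange (pre.length) ((pre.length) + post.length) 1).foldl
        (fun acc i => acc.set i.toNat (f i (acc.getD i.toNat d))) (pre ++ post)
      = pre ++ post.mapIdx (fun j x => f ((pre.length + j : Nat) : Int) x) := by
  intro post
  induction post with
  | nil => intro pre; simp [PySem.List.pyRange_one_eq_nil]
  | cons x rest ih =>
    intro pre
    rw [PySem.List.pyRange_one_cons (by simp)]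
    simp only [List.foldl_cons]
    have hgd : (pre ++ x :: rest).getD ((pre.length : Int)).toNat d = x := by
      simp
    have hset : (pre ++ x :: rest).set ((pre.length : Int)).toNat (f (pre.length) x)
        = (pre ++ [f (pre.length) x]) ++ rest := by
      simp
    rw [hgd, hset]
    have hlen : ((pre ++ [f (pre.length) x]).length : Int) = (pre.length : Int) + 1 := by simp
    have := ih (pre ++ [f (pre.length) x])
    rw [hlen] at this
    rw [show ((pre.length:Int) + ((x :: rest).length : Int)) = ((pre.length:Int) + 1 + (rest.length : Int)) by simp; ring]
    rw [this]
    simp [List.mapIdx_cons]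
    apply List.ext_getElem (by simp)
    intro i h1 h2
    simp only [List.getElem_mapIdx]
    congr 1
    ring

lemma setLoop {α : Type} (f : Int → α → α) (d : α) (xs : List α) :
    (PySem.List.pyRange 0 (xs.length) 1).foldl
        (fun acc i => acc.set i.toNat (f i (acc.getD i.toNat d))) xs
      = xs.mapIdx (fun j x => f (j : Int) x) := by
  have := setLoop_aux f d xs []
  simpa using this

lemma set_zero_nonempty {α : Type} (w : List α) (c : α) (h : w ≠ []) :
    w.set 0 c = c :: w.drop 1 := by
  cases w with
  | nil => simp at h
  | cons a as => simp

-- B's carry loop unrolled: the accumulated output is zip of (carry :: firsts-without-last) with the words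
lemma fold_carry :
    ∀ (ws : List (List Char)) (acc : List (List Char)) (c : Char),
      (ws.foldl
        (fun (p : List (List Char) × Char) w =>
          (p.1 ++ [p.2 :: PySem.List.slice w (some 1) none], PySem.List.pyGetD w 0 ' '))
        (acc, c)).1
      = acc ++ ((c :: (ws.map (fun w => PySem.List.pyGetD w 0 ' ')).dropLast).zip ws).map
          (fun p => p.1 :: PySem.List.slice p.2 (some 1) none) := by
  intro ws
  induction ws with
  | nil => intro acc c; simp
  | cons w rest ih =>
    intro acc c
    simp only [List.foldl_cons]
    rw [ih]
    cases rest with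
    | nil => simp
    | cons r rs =>
      have hne : ((r :: rs).map (fun w => PySem.List.pyGetD w 0 ' ')) ≠ [] := by simp
      simp

theorem shift_sentence_spec : Claim_equal_shift_sentence := by
  intro s _ hpre
  show shift_sentence s = shift_sentence_alt s
  unfold shift_sentence shift_sentence_alt
  simp only []
  set words : List (List Char) := PySem.Chars.splitOn s.toList [' '] with hwords
  set firsts : List Char := words.map (fun w => PySem.List.pyGetD w 0 ' ') with hfirsts
  have hw : words ≠ [] := splitOn_ne_nil _ _
  have hf : firsts ≠ [] := by simpa [hfirsts] using hw
  have hflen : firsts.length = words.length := by simp [hfirsts]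
  -- rotation on the A side: insert-then-pop is init :: dropLast
  have hrot : ((PySem.List.pop? (PySem.List.insert firsts 0 (PySem.List.pyGetD firsts (-1) ' ')) (-1)).map (·.2)).getD
        (PySem.List.insert firsts 0 (PySem.List.pyGetD firsts (-1) ' '))
      = PySem.List.pyGetD firsts (-1) ' ' :: firsts.dropLast := by
    rw [PySem.List.insert_zero]
    have hdecomp : PySem.List.pyGetD firsts (-1) ' ' :: firsts
        = (PySem.List.pyGetD firsts (-1) ' ' :: firsts.dropLast) ++ [firsts.getLast hf] := by
      simp [List.dropLast_concat_getLast hf]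
    rw [hdecomp, PySem.List.pop?_last]
    simp
  rw [hrot]
  set rotated : List Char := PySem.List.pyGetD firsts (-1) ' ' :: firsts.dropLast with hrotated
  have hfpos : firsts.length ≠ 0 := by simpa using hf
  have hrlen : rotated.length = words.length := by
    rw [hrotated]
    simp only [List.length_cons, List.length_dropLast]
    omega
  -- B's seed carry equals firsts[-1]
  have hinit : PySem.List.pyGetD (PySem.List.pyGetD words (-1) []) 0 ' '
      = PySem.List.pyGetD firsts (-1) ' ' := by
    rw [PySem.List.pyGetD_neg_one (h := hw), PySem.List.pyGetD_neg_one (h := hf)]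
    simp only [hfirsts, List.getLast_map]
  -- A's loop is mapIdx; B's fold is the zip-map; they are the same list
  rw [setLoop (fun i x => x.set 0 (PySem.List.pyGetD rotated i ' ')) [] words,
    fold_carry, hinit]
  have hmain : (List.mapIdx (fun j x => (fun (i : Int) (x : List Char) => x.set 0 (PySem.List.pyGetD rotated i ' ')) (j : Int) x) words)
      = ((rotated.zip words).map (fun p => p.1 :: PySem.List.slice p.2 (some 1) none)) := by
    apply List.ext_getElem (by simp [hrlen])
    intro i h1 h2
    have hi : i < words.length := by simpa using h1
    have hir : i < rotated.length := by omega
    have hwne : words[i] ≠ [] := hpre _ (List.getElem_mem hi)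
    simp only [List.getElem_mapIdx, List.getElem_map, List.getElem_zip]
    rw [PySem.List.pyGetD_eq_getElem _ _ (by omega) (by simpa using hir)]
    rw [PySem.List.slice_from _ (by omega)]
    simp only [Int.toNat_natCast, Int.toNat_one]
    exact set_zero_nonempty _ _ hwne
  rw [hmain, hrotated, hfirsts]
  simp
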